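-- pv_equiv track=rewrite | github.com/heitorchang/learn-code | battles/tourneys/20170607_1430.py | firstMultiple
-- ===== SOURCE A (Python) =====
-- def firstMultiple(divisors, start):
--
--     answer = start + 1
--     while True:
--         correct = True
--         for i in range(len(divisors)):
--             if answer % divisors[i] != 0:
--                 correct = False
--                 break
--         if correct:
--             return answer
--         answer += 1
-- ===== SOURCE B (Python) =====
-- def _gcd(a, b):
--     return a if b == 0 else _gcd(b, a % b)
--
--
-- def firstMultiple(divisors, start):
--     lcm = 1
--     for d in divisors:
--         lcm = lcm // _gcd(lcm, abs(d)) * abs(d)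
--     return (start // lcm + 1) * lcm
-- ===== Notes on version B (the rewrite author's own statement) =====
-- stated objective: faster
-- what changed: Replaces the linear scan of candidates (trial-testing every integer above start against all divisors) by computing the LCM of the divisors once with Euclid's gcd and returning the first multiple of it above start in closed form; intended as faster (a timing run saw A time out at n=16 where B returned; no clean ratio could be measured).
import Mathlib
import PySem

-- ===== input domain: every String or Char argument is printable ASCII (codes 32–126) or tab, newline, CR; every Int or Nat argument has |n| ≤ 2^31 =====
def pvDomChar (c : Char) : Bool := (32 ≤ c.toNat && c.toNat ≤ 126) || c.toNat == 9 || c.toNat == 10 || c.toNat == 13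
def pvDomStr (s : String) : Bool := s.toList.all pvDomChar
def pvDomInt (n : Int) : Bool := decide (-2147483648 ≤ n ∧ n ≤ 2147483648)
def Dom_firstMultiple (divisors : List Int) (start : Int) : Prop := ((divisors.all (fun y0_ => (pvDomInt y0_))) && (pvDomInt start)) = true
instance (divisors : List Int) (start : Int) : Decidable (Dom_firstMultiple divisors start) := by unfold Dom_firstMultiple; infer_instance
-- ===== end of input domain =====

-- B replaces A's candidate-by-candidate scan by one LCM computation (Euclid's gcd) and a closed-form division; intended as faster (a timing run saw A time out at n=16 where B returned, but could not verify a ratio).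

-- ===== PORT A =====
-- A's `while True` loop, made total with a fuel counter (the product of |divisors|: enough
-- steps to reach the answer whenever no divisor is 0; a pure totality guard, never exhausted under Pre_).
def fuelA (divisors : List Int) : Nat := divisors.foldl (fun a d => a * d.natAbs) 1

def loopA (divisors : List Int) : Nat → Int → Int
  | 0, answer => answer
  | fuel+1, answer =>
    if divisors.all (fun d => PySem.Int.mod answer d == 0) then answer
    else loopA divisors fuel (answer + 1)

def firstMultiple (divisors : List Int) (start : Int) : Int :=
  loopA divisors (fuelA divisors) (start + 1)

-- ===== PORT B =====
-- termination fact for gcdB (cited by its decreasing_by)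
theorem pymod_natAbs_lt (a b : Int) (hb : b ≠ 0) : (PySem.Int.mod a b).natAbs < b.natAbs := by
  rcases lt_or_gt_of_ne hb with h | h
  · have h1 := PySem.Int.mod_neg_bounds a h
    omega
  · have h1 := PySem.Int.mod_nonneg a h
    have h2 := PySem.Int.mod_lt a h
    omega

-- B's helper `_gcd(a, b) = a if b == 0 else _gcd(b, a % b)`
def gcdB (a b : Int) : Int :=
  if h : b = 0 then a else gcdB b (PySem.Int.mod a b)
termination_by b.natAbs
decreasing_by exact pymod_natAbs_lt a b h

def firstMultiple_alt (divisors : List Int) (start : Int) : Int :=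
  let lcm := divisors.foldl (fun lcm d => PySem.Int.floordiv lcm (gcdB lcm |d|) * |d|) 1
  (PySem.Int.floordiv start lcm + 1) * lcm

-- ===== PRECONDITION & SPEC =====
-- Pre_ excludes exactly the inputs on which Python A raises ZeroDivisionError (a divisor equal to 0).
def Pre_firstMultiple (divisors : List Int) (start : Int) : Prop := (0 : Int) ∉ divisors
instance (divisors : List Int) (start : Int) : Decidable (Pre_firstMultiple divisors start) := by unfold Pre_firstMultiple; infer_instance

def pvWitness_firstMultiple : List Int × Int := ([2, 3, -4], 5)

def Spec_firstMultiple (divisors : List Int) (start : Int) (out : Int) : Prop := out = firstMultiple_alt divisors start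
instance (divisors : List Int) (start : Int) (out : Int) : Decidable (Spec_firstMultiple divisors start out) := by unfold Spec_firstMultiple; infer_instance

-- ===== CLAIM (what is proved, stated in full; the proofs are below) =====
def Claim_equal_firstMultiple : Prop := ∀ (divisors : List Int) (start : Int), Dom_firstMultiple divisors start → Pre_firstMultiple divisors start → Spec_firstMultiple divisors start (firstMultiple divisors start)

-- ===== LEMMAS AND PROOFS =====

theorem gcd_emod_aux (a b : Int) : Int.gcd b (a % b) = Int.gcd a b := by
  apply Nat.dvd_antisymm
  · apply Int.dvd_gcd
    · have h1 : (↑(Int.gcd b (a % b)) : Int) ∣ b := Int.gcd_dvd_left _ _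
      have h2 : (↑(Int.gcd b (a % b)) : Int) ∣ a % b := Int.gcd_dvd_right _ _
      have h3 : a = b * (a / b) + a % b := by have := Int.mul_ediv_add_emod a b; omega
      have h4 := dvd_add (Dvd.dvd.mul_right h1 (a / b)) h2
      rw [← h3] at h4
      exact h4
    · exact Int.gcd_dvd_left _ _
  · apply Int.dvd_gcd
    · exact Int.gcd_dvd_right _ _
    · have h1 : (↑(Int.gcd a b) : Int) ∣ a := Int.gcd_dvd_left _ _
      have h2 : (↑(Int.gcd a b) : Int) ∣ b := Int.gcd_dvd_right _ _
      have h3 : a % b = a - b * (a / b) := by have := Int.mul_ediv_add_emod a b; omega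
      have h4 := dvd_sub h1 (Dvd.dvd.mul_right h2 (a / b))
      rw [← h3] at h4
      exact h4

theorem gcdB_eq_gcd (a b : Int) (ha : 0 ≤ a) (hb : 0 ≤ b) : gcdB a b = (Int.gcd a b : Int) := by
  fun_induction gcdB a b with
  | case1 a => simp [Int.gcd, Int.natAbs_of_nonneg ha]
  | case2 a b h ih =>
    have hbpos : 0 < b := lt_of_le_of_ne hb (Ne.symm h)
    rw [PySem.Int.mod_eq_emod_of_pos hbpos] at ih ⊢
    rw [ih hb (Int.emod_nonneg a (by omega)), gcd_emod_aux]

-- the list LCM as a Nat: the mathematical value B's fold computes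
def lcmNat (divisors : List Int) : Nat := divisors.foldl (fun a d => Nat.lcm a d.natAbs) 1

theorem fold_step (n : Nat) (d : Int) :
    PySem.Int.floordiv (n : Int) (gcdB (n : Int) |d|) * |d| = ((Nat.lcm n d.natAbs : Nat) : Int) := by
  rw [gcdB_eq_gcd _ _ (by positivity) (abs_nonneg d)]
  have hg : Int.gcd (n : Int) |d| = Nat.gcd n d.natAbs := by
    simp [Int.gcd, Int.natAbs_abs]
  rw [hg, PySem.Int.floordiv_natCast, Int.abs_eq_natAbs, ← Nat.cast_mul]
  congr 1
  rw [Nat.lcm, Nat.div_mul_right_comm (Nat.gcd_dvd_left n d.natAbs) d.natAbs]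

theorem fold_gen (ds : List Int) :
    ∀ n : Nat, ds.foldl (fun lcm d => PySem.Int.floordiv lcm (gcdB lcm |d|) * |d|) (n : Int)
      = ((ds.foldl (fun a d => Nat.lcm a d.natAbs) n : Nat) : Int) := by
  induction ds with
  | nil => intro n; simp
  | cons d ds ih =>
    intro n
    simp only [List.foldl_cons]
    rw [fold_step n d]
    exact ih _

theorem lcmNat_gen_pos (ds : List Int) (h : ∀ d ∈ ds, d ≠ 0) :
    ∀ n : Nat, 0 < n → 0 < ds.foldl (fun a d => Nat.lcm a d.natAbs) n := by
  induction ds with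
  | nil => intro n hn; simpa using hn
  | cons d ds ih =>
    intro n hn
    simp only [List.foldl_cons]
    apply ih (fun x hx => h x (List.mem_cons_of_mem d hx))
    have hd : d.natAbs ≠ 0 := by
      have := h d List.mem_cons_self; omega
    exact Nat.pos_of_ne_zero (fun hc => by
      rcases Nat.lcm_eq_zero_iff.mp hc with h1 | h1 <;> omega)

theorem lcmNat_gen_dvd_iff (ds : List Int) :
    ∀ (n : Nat) (m : Int), ((ds.foldl (fun a d => Nat.lcm a d.natAbs) n : Nat) : Int) ∣ m ↔
      ((n : Int) ∣ m ∧ ∀ d ∈ ds, d ∣ m) := by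
  induction ds with
  | nil => intro n m; simp
  | cons d ds ih =>
    intro n m
    simp only [List.foldl_cons]
    rw [ih]
    constructor
    · rintro ⟨h1, h2⟩
      have h3 : ((Nat.lcm n d.natAbs : Nat) : Int) ∣ m := h1
      have hn : ((n : Nat) : Int) ∣ m := dvd_trans (by exact_mod_cast Int.natCast_dvd_natCast.mpr (Nat.dvd_lcm_left n d.natAbs)) h3
      have hd : d ∣ m := Int.natAbs_dvd.mp (dvd_trans (Int.natCast_dvd_natCast.mpr (Nat.dvd_lcm_right n d.natAbs)) h3)
      exact ⟨hn, fun x hx => by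
        rcases List.mem_cons.mp hx with rfl | hx
        · exact hd
        · exact h2 x hx⟩
    · rintro ⟨h1, h2⟩
      refine ⟨?_, fun x hx => h2 x (List.mem_cons_of_mem d hx)⟩
      rw [Int.ofNat_dvd_left, Nat.lcm_dvd_iff]
      constructor
      · exact Int.ofNat_dvd_left.mp h1
      · exact Int.ofNat_dvd_left.mp (Int.natAbs_dvd.mpr (h2 d List.mem_cons_self))

theorem lcm_dvd_prod (ds : List Int) :
    ∀ n m : Nat, n ∣ m → ds.foldl (fun a d => Nat.lcm a d.natAbs) n ∣ ds.foldl (fun a d => a * d.natAbs) m := by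
  induction ds with
  | nil => intro n m h; simpa using h
  | cons d ds ih =>
    intro n m h
    simp only [List.foldl_cons]
    apply ih
    exact Nat.lcm_dvd (h.trans (dvd_mul_right m d.natAbs)) (dvd_mul_left d.natAbs m)

theorem prod_pos (ds : List Int) (h : ∀ d ∈ ds, d ≠ 0) :
    ∀ m : Nat, 0 < m → 0 < ds.foldl (fun a d => a * d.natAbs) m := by
  induction ds with
  | nil => intro m hm; simpa using hm
  | cons d ds ih =>
    intro m hm
    simp only [List.foldl_cons]
    apply ih (fun x hx => h x (List.mem_cons_of_mem d hx))
    have : d.natAbs ≠ 0 := by have := h d List.mem_cons_self; omega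
    positivity

theorem all_iff_dvd (divisors : List Int) (m : Int) :
    divisors.all (fun d => PySem.Int.mod m d == 0) = true ↔ ∀ d ∈ divisors, d ∣ m := by
  simp [List.all_eq_true, PySem.Int.mod_eq_zero_iff_dvd]

theorem loopA_spec (divisors : List Int) (n : Int)
    (hn : (∀ d ∈ divisors, d ∣ n)) :
    ∀ (fuel : Nat) (a : Int), a ≤ n →
      (∀ m, a ≤ m → m < n → ¬ (∀ d ∈ divisors, d ∣ m)) →
      (n - a).toNat < fuel → loopA divisors fuel a = n := by
  intro fuel
  induction fuel with
  | zero => intro a _ _ hlt; omega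
  | succ fuel ih =>
    intro a ha hmin hlt
    rw [loopA]
    by_cases hc : divisors.all (fun d => PySem.Int.mod a d == 0) = true
    · rw [if_pos hc]
      rcases eq_or_lt_of_le ha with rfl | hlt2
      · rfl
      · exact absurd ((all_iff_dvd divisors a).mp hc) (hmin a le_rfl hlt2)
    · rw [if_neg hc]
      have hane : a ≠ n := fun hc2 => hc (by rw [hc2]; exact (all_iff_dvd divisors n).mpr hn)
      have ha2 : a + 1 ≤ n := by omega
      exact ih (a + 1) ha2 (fun m hm1 hm2 => hmin m (by omega) hm2) (by omega)

theorem main_thm (divisors : List Int) (start : Int) (hpre : (0 : Int) ∉ divisors) :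
    firstMultiple divisors start = firstMultiple_alt divisors start := by
  have hne : ∀ d ∈ divisors, d ≠ 0 := fun d hd hc => hpre (hc ▸ hd)
  have hLpos : 0 < lcmNat divisors := lcmNat_gen_pos divisors hne 1 one_pos
  set L : Int := ((lcmNat divisors : Nat) : Int) with hLdef
  have hLpos' : 0 < L := by rw [hLdef]; exact_mod_cast hLpos
  -- B's value
  have hB : firstMultiple_alt divisors start = (PySem.Int.floordiv start L + 1) * L := by
    rw [firstMultiple_alt]
    have := fold_gen divisors 1
    simp only [Nat.cast_one] at this
    rw [this]
    rfl
  set q : Int := PySem.Int.floordiv start L with hq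
  set nB : Int := (q + 1) * L with hnB
  have hqL : q * L ≤ start ∧ start < (q + 1) * L := by
    have h1 := PySem.Int.floordiv_mul_add_mod start L
    have h2 := PySem.Int.mod_nonneg start hLpos'
    have h3 := PySem.Int.mod_lt start hLpos'
    constructor <;> nlinarith
  have hdvd_iff : ∀ m : Int, L ∣ m ↔ ∀ d ∈ divisors, d ∣ m := by
    intro m
    have := lcmNat_gen_dvd_iff divisors 1 m
    simpa [lcmNat] using this
  have hLnB : L ∣ nB := Dvd.intro_left _ rfl
  have hdvd : ∀ d ∈ divisors, d ∣ nB := (hdvd_iff nB).mp hLnB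
  have hmin : ∀ m, start + 1 ≤ m → m < nB → ¬ (∀ d ∈ divisors, d ∣ m) := by
    intro m hm1 hm2 hall
    have hLm : L ∣ m := (hdvd_iff m).mpr hall
    rcases hLm with ⟨k, rfl⟩
    have hk1 : q < k := by nlinarith [hqL.1]
    have : k * L ≥ (q + 1) * L := by nlinarith
    rw [mul_comm] at hm2
    omega
  -- fuel bound
  have hfuel : (nB - (start + 1)).toNat < fuelA divisors := by
    have hle : lcmNat divisors ≤ fuelA divisors := by
      apply Nat.le_of_dvd
      · exact prod_pos divisors hne 1 one_pos
      · exact lcm_dvd_prod divisors 1 1 dvd_rfl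
    have hnBle : nB ≤ start + L := by nlinarith [hqL.1]
    have : (L : Int) ≤ (fuelA divisors : Int) := by rw [hLdef]; exact_mod_cast hle
    omega
  rw [hB, firstMultiple]
  exact loopA_spec divisors nB hdvd (fuelA divisors) (start + 1) (by omega) hmin hfuel

-- ===== VERDICT (by name: the statement is the Claim_ definition above) =====
theorem firstMultiple_spec : Claim_equal_firstMultiple := by
  intro divisors start _hdom hpre
  unfold Spec_firstMultiple
  exact main_thm divisors start hpre
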